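-- pv_equiv track=rewrite | github.com/lixianphys/Scientific-data | peakFind.py | scissor
-- ===== SOURCE A (Python) =====
-- def scissor(c,x,y):
--     '''
--     Cut the input data into pieces by a critical value c
--     Arguments:
--     c: a critical value below which the input data is ignored
--     x: input data in x-axis
--     y: input data in y-axis. The same length as x
--     Return:
--     pieces_x: each piece of data in x-axis above c
--     pieces_y: each piece of data in y-axis above c
--     pieces_id: the index of each piece of data above c in the original input data (list)
--     '''
--     if len(x) != len(y):
--         raise ValueError('x and y should be of the same length')
--     else:
--         tb = [yy>c for yy in y]
--         pieces_x, pieces_y, pieces_id, new_piece_x, new_piece_y, new_piece_id  = [],[],[],[],[],[]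
--
--         for i, (xx, yy, boolen) in enumerate(zip(x,y,tb)):
--                 if boolen and i<len(tb)-1: # put into container if boolen is True and not at the end
--                     new_piece_x.append(xx)
--                     new_piece_y.append(yy)
--                     new_piece_id.append(i)
--                 elif new_piece_x: # if encounter boolen == False and the container is not empty, pack the container
--                     pieces_x.append(new_piece_x)
--                     pieces_y.append(new_piece_y)
--                     pieces_id.append(new_piece_id)
--                     new_piece_x, new_piece_y, new_piece_id  = [],[],[] # initiate an empty container
--
--     return pieces_x, pieces_y, pieces_id
-- ===== SOURCE B (Python) =====
-- def scissor(c, x, y):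
--     if len(x) != len(y):
--         raise ValueError('x and y should be of the same length')
--     n = len(x) - 1  # the final element never belongs to a piece
--     pieces_x, pieces_y, pieces_id = [], [], []
--     i = 0
--     while i < n:
--         if y[i] > c:
--             j = i + 1
--             while j < n and y[j] > c:
--                 j += 1
--             pieces_x.append(x[i:j])
--             pieces_y.append(y[i:j])
--             pieces_id.append(list(range(i, j)))
--             i = j
--         else:
--             i += 1
--     return pieces_x, pieces_y, pieces_id
-- ===== Notes on version B (the rewrite author's own statement) =====
-- stated objective: alternative
-- what changed: Replaces A's element-wise accumulate-and-flush state machine (boolean mask list plus six running containers) with a two-pointer run scanner that finds each maximal run y[i]>c among indices 0..n-2 and emits it at once via slices and range().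
import Mathlib
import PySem

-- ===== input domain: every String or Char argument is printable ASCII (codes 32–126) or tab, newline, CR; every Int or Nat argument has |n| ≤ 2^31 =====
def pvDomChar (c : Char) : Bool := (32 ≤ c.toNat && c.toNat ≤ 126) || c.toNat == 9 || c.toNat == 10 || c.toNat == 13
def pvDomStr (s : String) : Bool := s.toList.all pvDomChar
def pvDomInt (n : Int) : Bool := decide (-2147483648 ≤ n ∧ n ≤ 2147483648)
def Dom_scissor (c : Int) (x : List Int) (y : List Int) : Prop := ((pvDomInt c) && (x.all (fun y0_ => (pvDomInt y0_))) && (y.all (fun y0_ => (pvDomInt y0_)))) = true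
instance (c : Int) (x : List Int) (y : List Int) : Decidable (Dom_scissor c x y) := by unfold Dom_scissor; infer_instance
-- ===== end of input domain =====

-- B replaces A's accumulate-and-flush state machine by a two-pointer run scanner; same O(n) cost.

-- ===== PORT A =====
-- the for loop over enumerate(zip(x, y, tb)): list recursion carrying the index i;
-- state = ((pieces_x, pieces_y, pieces_id), (new_piece_x, new_piece_y, new_piece_id))
def pvALoop (c : Int) (m : Nat) (i : Nat) (l : List (Int × Int × Bool))
    (st : (List (List Int) × List (List Int) × List (List Int)) ×
          (List Int × List Int × List Int)) :
    (List (List Int) × List (List Int) × List (List Int)) ×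
    (List Int × List Int × List Int) :=
  match l with
  | [] => st
  | (xx, yy, b) :: rest =>
      let ((px, py, pid), (nx, ny, nid)) := st
      pvALoop c m (i + 1) rest
        (if b ∧ i < m - 1 then ((px, py, pid), (nx ++ [xx], ny ++ [yy], nid ++ [(i : Int)]))
         else if nx ≠ [] then ((px ++ [nx], py ++ [ny], pid ++ [nid]), ([], [], []))
         else ((px, py, pid), (nx, ny, nid)))

def scissor (c : Int) (x : List Int) (y : List Int) :
    List (List Int) × List (List Int) × List (List Int) :=
  if x.length ≠ y.length then ([], [], [])  -- Python raises ValueError here (excluded by Pre_)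
  else
    let tb := y.map (fun yy => decide (yy > c))
    (pvALoop c y.length 0 (x.zip (y.zip tb)) (([], [], []), ([], [], []))).1

-- ===== PORT B =====
-- inner while: advance j while j < n and y[j] > c  (y[j] via getD: j < n < len y under Pre_)
def pvScan (c : Int) (y : List Int) (n : Nat) (j : Nat) : Nat :=
  if j < n ∧ y.getD j 0 > c then pvScan c y n (j + 1) else j
termination_by n - j
decreasing_by omega

-- the port of B's outer while-loop needs j = pvScan … (i+1) > i for termination
theorem pvScan_ge (c : Int) (y : List Int) (n j : Nat) : j ≤ pvScan c y n j := by
  unfold pvScan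
  split
  · have := pvScan_ge c y n (j + 1); omega
  · exact le_refl j
termination_by n - j
decreasing_by omega

def pvBLoop (c : Int) (x y : List Int) (n : Nat) (i : Nat)
    (px py pid : List (List Int)) :
    List (List Int) × List (List Int) × List (List Int) :=
  if i < n then
    if y.getD i 0 > c then
      let j := pvScan c y n (i + 1)
      pvBLoop c x y n j
        (px ++ [PySem.List.slice x (some (i : Int)) (some (j : Int))])
        (py ++ [PySem.List.slice y (some (i : Int)) (some (j : Int))])
        (pid ++ [PySem.List.pyRange (i : Int) (j : Int) 1])
    else pvBLoop c x y n (i + 1) px py pid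
  else (px, py, pid)
termination_by n - i
decreasing_by
  · have := pvScan_ge c y n (i + 1); omega
  · omega

def scissor_alt (c : Int) (x : List Int) (y : List Int) :
    List (List Int) × List (List Int) × List (List Int) :=
  if x.length ≠ y.length then ([], [], [])  -- Python raises ValueError here (excluded by Pre_)
  else pvBLoop c x y (x.length - 1) 0 [] [] []

-- ===== PRECONDITION & SPEC =====
-- Pre_ excludes exactly the inputs where Python A raises ValueError (length mismatch)
def Pre_scissor (c : Int) (x : List Int) (y : List Int) : Prop := x.length = y.length
instance (c : Int) (x : List Int) (y : List Int) : Decidable (Pre_scissor c x y) := by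
  unfold Pre_scissor; infer_instance

def pvWitness_scissor : Int × List Int × List Int := (0, [5, 7, 1, 9, 4], [2, 3, -1, 6, 8])

def Spec_scissor (c : Int) (x : List Int) (y : List Int) (out : List (List Int) × List (List Int) × List (List Int)) : Prop := out = scissor_alt c x y
instance (c : Int) (x : List Int) (y : List Int) (out : List (List Int) × List (List Int) × List (List Int)) : Decidable (Spec_scissor c x y out) := by unfold Spec_scissor; infer_instance

-- ===== CLAIM (what is proved, stated in full; the proofs are below) =====
def Claim_equal_scissor : Prop := ∀ (c : Int) (x : List Int) (y : List Int), Dom_scissor c x y → Pre_scissor c x y → Spec_scissor c x y (scissor c x y)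

-- ===== LEMMAS AND PROOFS =====

-- the zipped list A's for-loop runs over
def pvZ (c : Int) (x y : List Int) : List (Int × Int × Bool) :=
  x.zip (y.zip (y.map (fun yy => decide (yy > c))))

theorem pvZ_length (c : Int) (x y : List Int) (m : Nat)
    (hx : x.length = m) (hy : y.length = m) : (pvZ c x y).length = m := by
  simp [pvZ, hx, hy]

theorem pvZ_drop_cons (c : Int) (x y : List Int) (m i : Nat)
    (hx : x.length = m) (hy : y.length = m) (h : i < m) :
    (pvZ c x y).drop i =
      (x[i]'(by omega), (y[i]'(by omega), decide (y[i]'(by omega) > c))) :: (pvZ c x y).drop (i + 1) := by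
  have hl : i < (pvZ c x y).length := by rw [pvZ_length c x y m hx hy]; exact h
  rw [List.drop_eq_getElem_cons hl]
  congr 1
  simp [pvZ]

theorem pvScan_le (c : Int) (y : List Int) (n j : Nat) (h : j ≤ n) : pvScan c y n j ≤ n := by
  unfold pvScan
  split
  · exact pvScan_le c y n (j + 1) (by omega)
  · exact h
termination_by n - j
decreasing_by omega

theorem pvScan_true (c : Int) (y : List Int) (n j : Nat) :
    ∀ k, j ≤ k → k < pvScan c y n j → y.getD k 0 > c := by
  intro k h1 h2
  rw [pvScan] at h2
  by_cases hc : j < n ∧ y.getD j 0 > c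
  · rw [if_pos hc] at h2
    rcases Nat.eq_or_lt_of_le h1 with h | h
    · exact h ▸ hc.2
    · exact pvScan_true c y n (j + 1) k h h2
  · rw [if_neg hc] at h2; omega
termination_by n - j
decreasing_by omega

theorem pvScan_stop (c : Int) (y : List Int) (n j : Nat)
    (h : pvScan c y n j < n) : ¬ (y.getD (pvScan c y n j) 0 > c) := by
  by_cases hc : j < n ∧ y.getD j 0 > c
  · rw [pvScan, if_pos hc] at h ⊢
    exact pvScan_stop c y n (j + 1) h
  · rw [pvScan, if_neg hc] at h ⊢
    intro hgt; exact hc ⟨h, hgt⟩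
termination_by n - j
decreasing_by omega

-- one-step unfoldings of B's loop
theorem pvBLoop_exit (c : Int) (x y : List Int) (n i : Nat) (px py pid : List (List Int))
    (h : ¬ i < n) : pvBLoop c x y n i px py pid = (px, py, pid) := by
  rw [pvBLoop, if_neg h]

theorem pvBLoop_step_skip (c : Int) (x y : List Int) (n i : Nat) (px py pid : List (List Int))
    (h1 : i < n) (h2 : ¬ y.getD i 0 > c) :
    pvBLoop c x y n i px py pid = pvBLoop c x y n (i + 1) px py pid := by
  rw [pvBLoop, if_pos h1, if_neg h2]

theorem pvBLoop_step_run (c : Int) (x y : List Int) (n i : Nat) (px py pid : List (List Int))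
    (h1 : i < n) (h2 : y.getD i 0 > c) :
    pvBLoop c x y n i px py pid = pvBLoop c x y n (pvScan c y n (i + 1))
      (px ++ [(x.drop i).take (pvScan c y n (i + 1) - i)])
      (py ++ [(y.drop i).take (pvScan c y n (i + 1) - i)])
      (pid ++ [PySem.List.pyRange (i : Int) ((pvScan c y n (i + 1) : Nat) : Int) 1]) := by
  rw [pvBLoop, if_pos h1, if_pos h2]
  simp [PySem.List.slice_natCast]

-- A's loop through a run of consecutive True indices only accumulates the container
theorem pvARun (c : Int) (x y : List Int) (m : Nat)
    (hx : x.length = m) (hy : y.length = m)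
    (i0 j : Nat) (hj : j ≤ m - 1)
    (hrun : ∀ k, i0 ≤ k → k < j → y.getD k 0 > c)
    (px py pid : List (List Int)) :
    ∀ k, i0 ≤ k → k ≤ j →
      pvALoop c m k ((pvZ c x y).drop k)
        ((px, py, pid),
         ((x.drop i0).take (k - i0), (y.drop i0).take (k - i0), PySem.List.pyRange (i0 : Int) (k : Int) 1))
      = pvALoop c m j ((pvZ c x y).drop j)
        ((px, py, pid),
         ((x.drop i0).take (j - i0), (y.drop i0).take (j - i0), PySem.List.pyRange (i0 : Int) (j : Int) 1)) := by
  intro k hik hkj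
  rcases Nat.eq_or_lt_of_le hkj with he | hlt
  · rw [he]
  · have hm1 : 1 ≤ m := by omega
    have hkm : k < m := by omega
    have hgt : y.getD k 0 > c := hrun k hik hlt
    have hget : y[k]'(by omega) > c := by
      rwa [List.getD_eq_getElem y 0 (by omega)] at hgt
    rw [pvZ_drop_cons c x y m k hx hy hkm]
    rw [pvALoop]
    rw [if_pos ⟨by simpa using hget, by omega⟩]
    have e1 : (x.drop i0).take (k - i0) ++ [x[k]'(by omega)] = (x.drop i0).take (k + 1 - i0) := by
      rw [show k + 1 - i0 = (k - i0) + 1 by omega, List.take_succ]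
      congr 1
      rw [List.getElem?_drop, show i0 + (k - i0) = k by omega,
          List.getElem?_eq_getElem (by omega)]
      rfl
    have e2 : (y.drop i0).take (k - i0) ++ [y[k]'(by omega)] = (y.drop i0).take (k + 1 - i0) := by
      rw [show k + 1 - i0 = (k - i0) + 1 by omega, List.take_succ]
      congr 1
      rw [List.getElem?_drop, show i0 + (k - i0) = k by omega,
          List.getElem?_eq_getElem (by omega)]
      rfl
    have e3 : PySem.List.pyRange (i0 : Int) (k : Int) 1 ++ [(k : Int)]
        = PySem.List.pyRange (i0 : Int) ((k + 1 : Nat) : Int) 1 := by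
      push_cast
      rw [PySem.List.pyRange_one_succ_right (by exact_mod_cast hik)]
    rw [e1, e2, e3]
    exact pvARun c x y m hx hy i0 j hj hrun px py pid (k + 1) (by omega) (by omega)
termination_by k => j - k
decreasing_by omega

-- main invariant: from any index with an empty container, A's remaining loop equals B's loop
theorem pvMain (c : Int) (x y : List Int) (m : Nat)
    (hx : x.length = m) (hy : y.length = m)
    (i : Nat) (px py pid : List (List Int)) :
    (pvALoop c m i ((pvZ c x y).drop i) ((px, py, pid), ([], [], []))).1
      = pvBLoop c x y (m - 1) i px py pid := by
  by_cases him : i < m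
  · rw [pvZ_drop_cons c x y m i hx hy him]
    by_cases hin : i < m - 1
    · by_cases hgt : y.getD i 0 > c
      · -- run starting at i
        have hgeti : y[i]'(by omega) > c := by
          rwa [List.getD_eq_getElem y 0 (by omega)] at hgt
        have hji : i + 1 ≤ pvScan c y (m - 1) (i + 1) := pvScan_ge c y (m - 1) (i + 1)
        have hjn : pvScan c y (m - 1) (i + 1) ≤ m - 1 := pvScan_le c y (m - 1) (i + 1) (by omega)
        set j := pvScan c y (m - 1) (i + 1) with hjdef
        have hjm : j < m := by omega
        have hrun : ∀ k, i ≤ k → k < j → y.getD k 0 > c := by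
          intro k hk1 hk2
          rcases Nat.eq_or_lt_of_le hk1 with h | h
          · exact h ▸ hgt
          · exact pvScan_true c y (m - 1) (i + 1) k h hk2
        -- A: accumulate x[i] into the empty container
        rw [pvALoop, if_pos ⟨by simpa using hgeti, hin⟩]
        have e1 : ([] : List Int) ++ [x[i]'(by omega)] = (x.drop i).take (i + 1 - i) := by
          rw [show i + 1 - i = 1 by omega, List.take_one_drop_eq_of_lt_length (by omega)]
          rfl
        have e2 : ([] : List Int) ++ [y[i]'(by omega)] = (y.drop i).take (i + 1 - i) := by
          rw [show i + 1 - i = 1 by omega, List.take_one_drop_eq_of_lt_length (by omega)]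
          rfl
        have e3 : ([] : List Int) ++ [(i : Int)] = PySem.List.pyRange (i : Int) ((i + 1 : Nat) : Int) 1 := by
          push_cast
          rw [PySem.List.pyRange_one_singleton]
          rfl
        rw [e1, e2, e3]
        -- A: through the run to j
        rw [pvARun c x y m hx hy i j hjn hrun px py pid (i + 1) (by omega) hji]
        -- A: at j the condition fails and the non-empty container is flushed
        have hcond : ¬ ((decide (y[j]'(by omega) > c) : Bool) ∧ j < m - 1) := by
          rintro ⟨hb, hjlt⟩
          have := pvScan_stop c y (m - 1) (i + 1) (hjdef ▸ hjlt)
          rw [← hjdef, List.getD_eq_getElem y 0 (by omega)] at this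
          exact this (by simpa using hb)
        have hne : (x.drop i).take (j - i) ≠ [] := by
          have : ((x.drop i).take (j - i)).length = min (j - i) (x.length - i) := by
            simp
          intro hnil
          rw [hnil] at this
          simp at this
          omega
        rw [pvZ_drop_cons c x y m j hx hy hjm, pvALoop, if_neg hcond, if_pos hne]
        rw [pvMain c x y m hx hy (j + 1) (px ++ [(x.drop i).take (j - i)])
          (py ++ [(y.drop i).take (j - i)]) (pid ++ [PySem.List.pyRange (i : Int) (j : Int) 1])]
        -- B: one step at i lands at j with the same pieces
        rw [pvBLoop_step_run c x y (m - 1) i px py pid hin hgt, ← hjdef]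
        -- B: from j to j + 1 nothing changes
        by_cases hj2 : j < m - 1
        · have hstop := pvScan_stop c y (m - 1) (i + 1) (hjdef ▸ hj2)
          rw [← hjdef] at hstop
          rw [pvBLoop_step_skip c x y (m - 1) j _ _ _ hj2 hstop]
        · rw [pvBLoop_exit c x y (m - 1) j _ _ _ hj2,
              pvBLoop_exit c x y (m - 1) (j + 1) _ _ _ (by omega)]
      · -- below threshold: both sides skip index i
        have hgeti : ¬ (y[i]'(by omega) > c) := by
          rwa [List.getD_eq_getElem y 0 (by omega)] at hgt
        rw [pvALoop, if_neg (by rintro ⟨hb, _⟩; exact hgeti (by simpa using hb)),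
            if_neg (by simp)]
        rw [pvMain c x y m hx hy (i + 1) px py pid]
        rw [pvBLoop_step_skip c x y (m - 1) i px py pid hin hgt]
    · -- the last index: condition false, container empty, loop ends
      have hdrop : (pvZ c x y).drop (i + 1) = [] := by
        apply List.drop_eq_nil_of_le
        rw [pvZ_length c x y m hx hy]; omega
      rw [pvALoop, if_neg (by rintro ⟨_, h⟩; omega), if_neg (by simp), hdrop, pvALoop,
          pvBLoop_exit c x y (m - 1) i px py pid hin]
  · have hdrop : (pvZ c x y).drop i = [] := by
      apply List.drop_eq_nil_of_le
      rw [pvZ_length c x y m hx hy]; omega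
    rw [hdrop, pvALoop, pvBLoop_exit c x y (m - 1) i px py pid (by omega)]
termination_by m - i
decreasing_by all_goals omega

-- ===== VERDICT (by name: the statement is the Claim_ definition above) =====
theorem scissor_spec : Claim_equal_scissor := by
  intro c x y _ hpre
  have hpre' : x.length = y.length := hpre
  unfold Spec_scissor scissor scissor_alt
  rw [if_neg (by simpa using hpre), if_neg (by simpa using hpre)]
  have h := pvMain c x y y.length hpre rfl 0 [] [] []
  simpa [pvZ, hpre'] using h
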